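-- pv_equiv track=rewrite | github.com/s-hiraoku/synapse-a2a | scripts/patch_homebrew_formula.py | extract_resource_stanzas
-- ===== SOURCE A (Python) =====
-- def extract_resource_stanzas(poet_output: str) -> str:
--     """Extract resource stanzas from poet -f output.
--
--     Poet generates a full formula class. We only need the `resource "..." do`
--     blocks that sit between `depends_on` and `def install`.
--     """
--     lines = poet_output.splitlines()
--     stanzas: list[str] = []
--     inside_resource = False
--
--     for line in lines:
--         if line.strip().startswith('resource "'):
--             inside_resource = True
--         if inside_resource:
--             stanzas.append(line)
--             if line.strip() == "end":
--                 inside_resource = False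
--                 stanzas.append("")
--
--     return "\n".join(stanzas).rstrip()
-- ===== SOURCE B (Python) =====
-- def _take_block(lines, i):
--     """Return (block lines from i through the first 'end' line, next index)."""
--     j = i
--     while j < len(lines) and lines[j].strip() != "end":
--         j += 1
--     return lines[i:j + 1], j + 1
--
--
-- def extract_resource_stanzas(poet_output: str) -> str:
--     """Extract resource stanzas from poet -f output.
--
--     Slice the line list into whole blocks (from a `resource "` start line
--     through the first line that strips to `end`, or to EOF), then join the
--     block texts with a blank line between them.
--     """
--     lines = poet_output.splitlines()
--     blocks = []
--     i = 0
--     while i < len(lines):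
--         if lines[i].strip().startswith('resource "'):
--             block, i = _take_block(lines, i)
--             blocks.append("\n".join(block))
--         else:
--             i += 1
--     return "\n\n".join(blocks).rstrip()
-- ===== Notes on version B (the rewrite author's own statement) =====
-- stated objective: alternative
-- what changed: Replaces the per-line inside_resource flag state machine (which interleaves block lines and blank separators into one flat list) with block extraction: each stanza is sliced out as a whole, from its start line through the first terminator line, and the block texts are joined with a blank line between them.
import Mathlib
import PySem

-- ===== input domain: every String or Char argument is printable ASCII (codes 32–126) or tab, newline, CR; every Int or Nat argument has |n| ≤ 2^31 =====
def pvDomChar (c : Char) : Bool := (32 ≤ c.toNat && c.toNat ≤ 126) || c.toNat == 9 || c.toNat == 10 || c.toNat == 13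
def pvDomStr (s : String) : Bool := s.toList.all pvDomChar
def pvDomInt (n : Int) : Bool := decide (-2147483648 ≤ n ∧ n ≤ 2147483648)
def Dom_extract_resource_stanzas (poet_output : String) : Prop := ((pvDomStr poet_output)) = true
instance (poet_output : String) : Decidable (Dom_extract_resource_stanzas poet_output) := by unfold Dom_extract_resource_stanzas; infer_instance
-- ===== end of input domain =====

-- B slices each stanza out as a whole block (start line through the first 'end' line) and joins
-- the block texts with blank lines, instead of A's per-line inside_resource flag state machine.

-- ===== PORT A =====
def extract_resource_stanzas (poet_output : String) : String :=
  let lines := PySem.Str.splitlines poet_output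
  let st := lines.foldl (fun (acc : List String × Bool) line =>
    let inside := if PySem.Str.startswith (PySem.Str.strip line) "resource \"" then true else acc.2
    if inside then
      if PySem.Str.strip line == "end" then (acc.1 ++ [line, ""], false)
      else (acc.1 ++ [line], true)
    else (acc.1, inside)) ([], false)
  PySem.Str.rstrip (PySem.Str.join "\n" st.1)

-- ===== PORT B =====
-- _take_block of Source B: scan to the first line stripping to "end"; block = lines[i:j+1], rest = lines[j+1:]
def pvTakeBlock (lines : List String) : List String × List String :=
  match lines with
  | [] => ([], [])
  | l :: rest =>
    if PySem.Str.strip l == "end" then ([l], rest)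
    else
      let p := pvTakeBlock rest
      (l :: p.1, p.2)

-- termination helper for pvCollect (cited in its decreasing_by)
theorem pvTakeBlock_snd_length (xs : List String) : (pvTakeBlock xs).2.length ≤ xs.length := by
  induction xs with
  | nil => simp [pvTakeBlock]
  | cons l rest ih =>
    simp only [pvTakeBlock]
    split
    · simp
    · simpa using Nat.le_succ_of_le ih

-- the outer while loop of Source B: collect whole blocks in order
def pvCollect (lines : List String) : List String :=
  match lines with
  | [] => []
  | l :: rest =>
    if PySem.Str.startswith (PySem.Str.strip l) "resource \"" then
      let p := pvTakeBlock (l :: rest)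
      PySem.Str.join "\n" p.1 :: pvCollect p.2
    else pvCollect rest
termination_by lines.length
decreasing_by
  · have h := pvTakeBlock_snd_length rest
    simp only [pvTakeBlock]
    split
    · simp
    · simp; omega
  · simp

def extract_resource_stanzas_alt (poet_output : String) : String :=
  PySem.Str.rstrip (PySem.Str.join "\n\n" (pvCollect (PySem.Str.splitlines poet_output)))

-- ===== PRECONDITION & SPEC =====
def Spec_extract_resource_stanzas (poet_output : String) (out : String) : Prop := out = extract_resource_stanzas_alt poet_output
instance (poet_output : String) (out : String) : Decidable (Spec_extract_resource_stanzas poet_output out) := by unfold Spec_extract_resource_stanzas; infer_instance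

-- ===== CLAIM (what is proved, stated in full; the proofs are below) =====
def Claim_equal_extract_resource_stanzas : Prop := ∀ (poet_output : String), Dom_extract_resource_stanzas poet_output → Spec_extract_resource_stanzas poet_output (extract_resource_stanzas poet_output)

-- ===== LEMMAS AND PROOFS =====

def pvIsEnd (l : String) : Bool := PySem.Str.strip l == "end"
def pvIsStart (l : String) : Bool := PySem.Str.startswith (PySem.Str.strip l) "resource \""

-- A's state machine as a direct recursion (bridged to A's foldl by pvFoldA)
def pvAuxA : List String → Bool → List String
  | [], _ => []
  | l :: rest, inside =>
    let inside1 := if pvIsStart l then true else inside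
    if inside1 then
      if pvIsEnd l then l :: "" :: pvAuxA rest false
      else l :: pvAuxA rest true
    else pvAuxA rest false

def pvStep (acc : List String × Bool) (line : String) : List String × Bool :=
  let inside := if PySem.Str.startswith (PySem.Str.strip line) "resource \"" then true else acc.2
  if inside then
    if PySem.Str.strip line == "end" then (acc.1 ++ [line, ""], false)
    else (acc.1 ++ [line], true)
  else (acc.1, inside)

theorem pvFoldA (lines : List String) : ∀ (acc : List String) (inside : Bool),
    (lines.foldl pvStep (acc, inside)).1 = acc ++ pvAuxA lines inside := by
  induction lines with
  | nil => intro acc inside; simp [pvAuxA]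
  | cons l rest ih =>
    intro acc inside
    rw [List.foldl_cons]
    by_cases hs : PySem.Str.startswith (PySem.Str.strip l) "resource \"" = true
    · by_cases he : (PySem.Str.strip l == "end") = true
      · rw [show pvStep (acc, inside) l = (acc ++ [l, ""], false) by
          simp only [pvStep]; rw [hs, he]; simp, ih,
          show pvAuxA (l :: rest) inside = l :: "" :: pvAuxA rest false by
            simp [pvAuxA, show pvIsStart l = true from hs, show pvIsEnd l = true from he]]
        simp
      · rw [show pvStep (acc, inside) l = (acc ++ [l], true) by
          simp only [pvStep]; rw [hs, eq_false_of_ne_true he]; simp, ih,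
          show pvAuxA (l :: rest) inside = l :: pvAuxA rest true by
            simp [pvAuxA, show pvIsStart l = true from hs,
              show pvIsEnd l = false from eq_false_of_ne_true he]]
        simp
    · cases inside with
      | false =>
        rw [show pvStep (acc, false) l = (acc, false) by
          simp only [pvStep]; rw [eq_false_of_ne_true hs]; simp, ih,
          show pvAuxA (l :: rest) false = pvAuxA rest false by
            simp [pvAuxA, show pvIsStart l = false from eq_false_of_ne_true hs]]
      | true =>
        by_cases he : (PySem.Str.strip l == "end") = true
        · rw [show pvStep (acc, true) l = (acc ++ [l, ""], false) by
            simp only [pvStep]; rw [eq_false_of_ne_true hs, he]; simp, ih,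
            show pvAuxA (l :: rest) true = l :: "" :: pvAuxA rest false by
              simp [pvAuxA, show pvIsEnd l = true from he]]
          simp
        · rw [show pvStep (acc, true) l = (acc ++ [l], true) by
            simp only [pvStep]; rw [eq_false_of_ne_true hs, eq_false_of_ne_true he]; simp, ih,
            show pvAuxA (l :: rest) true = l :: pvAuxA rest true by
              simp [pvAuxA, show pvIsEnd l = false from eq_false_of_ne_true he]]
          simp

theorem pvStart_not_end (l : String) (h : pvIsStart l = true) : pvIsEnd l = false := by
  cases he : pvIsEnd l with
  | false => rfl
  | true =>
    have hst : PySem.Str.strip l = "end" := by simpa [pvIsEnd] using he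
    rw [pvIsStart, hst] at h
    exact absurd h (by decide)

theorem pvStart_ne_nil (l : String) (h : pvIsStart l = true) : l.toList ≠ [] := by
  intro hnil
  rw [pvIsStart] at h
  rw [show PySem.Str.startswith (PySem.Str.strip l) "resource \"" =
      PySem.Chars.startswith (PySem.Chars.strip l.toList) "resource \"".toList by simp [pysem]] at h
  rw [hnil] at h
  exact absurd h (by decide)

theorem pvTakeBlock_no_end (xs : List String) (h : xs.any pvIsEnd = false) :
    pvTakeBlock xs = (xs, []) := by
  induction xs with
  | nil => rfl
  | cons l rest ih =>
    simp only [List.any_cons, Bool.or_eq_false_iff] at h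
    simp only [pvTakeBlock]
    rw [if_neg (by simpa [pvIsEnd] using h.1)]
    simp [ih h.2]

theorem pvTakeBlock_cons_noend (l : String) (rest : List String) (he : pvIsEnd l = false) :
    pvTakeBlock (l :: rest) = (l :: (pvTakeBlock rest).1, (pvTakeBlock rest).2) := by
  have h' : ¬ PySem.Str.strip l = "end" := by simpa [pvIsEnd] using he
  simp [pvTakeBlock, h']

theorem pvAuxA_true (xs : List String) :
    pvAuxA xs true = (pvTakeBlock xs).1 ++
      (if xs.any pvIsEnd then "" :: pvAuxA (pvTakeBlock xs).2 false else []) := by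
  induction xs with
  | nil => simp [pvAuxA, pvTakeBlock]
  | cons l rest ih =>
    cases he : pvIsEnd l with
    | true =>
      have h' : PySem.Str.strip l = "end" := by simpa [pvIsEnd] using he
      simp [pvAuxA, pvTakeBlock, h', pvIsEnd]
    | false =>
      rw [pvTakeBlock_cons_noend l rest he]
      simp only [List.any_cons, he, Bool.false_or]
      rw [show pvAuxA (l :: rest) true = l :: pvAuxA rest true by simp [pvAuxA, he], ih]
      simp

theorem pvAuxA_false_start (l : String) (rest : List String) (hs : pvIsStart l = true) :
    pvAuxA (l :: rest) false = l :: pvAuxA rest true := by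
  simp [pvAuxA, hs, pvStart_not_end l hs]

theorem pvAuxA_false_nostart (l : String) (rest : List String) (hs : pvIsStart l = false) :
    pvAuxA (l :: rest) false = pvAuxA rest false := by
  simp [pvAuxA, hs]

def pvJ1 (xs : List String) : List Char := PySem.Chars.join ['\n'] (xs.map String.toList)
def pvJ2 (xs : List String) : List Char := PySem.Chars.join ['\n', '\n'] (xs.map String.toList)

theorem pvJoin_cons_ne (sep x : List Char) (ys : List (List Char)) (h : ys ≠ []) :
    PySem.Chars.join sep (x :: ys) = x ++ sep ++ PySem.Chars.join sep ys := by
  cases ys with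
  | nil => exact absurd rfl h
  | cons y t => exact PySem.Chars.join_cons_cons sep x y t

theorem pvJoin_append (sep : List Char) (xs ys : List (List Char)) (hx : xs ≠ []) (hy : ys ≠ []) :
    PySem.Chars.join sep (xs ++ ys) = PySem.Chars.join sep xs ++ sep ++ PySem.Chars.join sep ys := by
  induction xs with
  | nil => exact absurd rfl hx
  | cons x t ih =>
    cases t with
    | nil => simpa [PySem.Chars.join_singleton] using pvJoin_cons_ne sep x ys hy
    | cons x2 t2 =>
      rw [List.cons_append, pvJoin_cons_ne sep x ((x2 :: t2) ++ ys) (by simp),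
        ih (by simp), PySem.Chars.join_cons_cons]
      simp [List.append_assoc]

theorem pvJoin_ne_nil (sep x : List Char) (ys : List (List Char)) (hx : x ≠ []) :
    PySem.Chars.join sep (x :: ys) ≠ [] := by
  cases ys with
  | nil => simpa [PySem.Chars.join_singleton] using hx
  | cons y t => rw [PySem.Chars.join_cons_cons]; simp [hx]

theorem pvCollect_cons_start (l : String) (rest : List String) (hs : pvIsStart l = true) :
    pvCollect (l :: rest) = PySem.Str.join "\n" (l :: (pvTakeBlock rest).1) ::
      pvCollect (pvTakeBlock rest).2 := by
  rw [pvCollect.eq_def]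
  dsimp only
  rw [if_pos (by simpa [pvIsStart] using hs)]
  rw [pvTakeBlock_cons_noend l rest (pvStart_not_end l hs)]

theorem pvCollect_cons_nostart (l : String) (rest : List String) (hs : pvIsStart l = false) :
    pvCollect (l :: rest) = pvCollect rest := by
  rw [pvCollect.eq_def]
  dsimp only
  rw [if_neg (by simp [pvIsStart] at hs; simp [hs])]

theorem pvCollect_nil : pvCollect [] = [] := by rw [pvCollect.eq_def]

theorem pvCollect_ne_nil (xs : List String) : ∀ s ∈ pvCollect xs, s.toList ≠ [] := by
  induction xs using pvCollect.induct with
  | case1 => simp [pvCollect_nil]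
  | case2 l rest hs p ih =>
    have hs' : pvIsStart l = true := by simpa [pvIsStart] using hs
    have hq : p = pvTakeBlock (l :: rest) := rfl
    rw [hq, pvTakeBlock_cons_noend l rest (pvStart_not_end l hs')] at ih
    intro s hmem
    rw [pvCollect_cons_start l rest hs'] at hmem
    rcases List.mem_cons.mp hmem with hmem | hmem
    · subst hmem
      rw [PySem.Str.toList_join, List.map_cons]
      exact pvJoin_ne_nil _ _ _ (pvStart_ne_nil l hs')
    · exact ih s hmem
  | case3 l rest hs ih =>
    have hs' : pvIsStart l = false := by simp [pvIsStart]; simpa using hs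
    intro s hmem
    rw [pvCollect_cons_nostart l rest hs'] at hmem
    exact ih s hmem

theorem pvJ2_ne_nil (xs : List String) (hne : xs ≠ []) (h : ∀ s ∈ xs, s.toList ≠ []) :
    pvJ2 xs ≠ [] := by
  cases xs with
  | nil => exact absurd rfl hne
  | cons x t =>
    rw [pvJ2, List.map_cons]
    exact pvJoin_ne_nil _ _ _ (h x (by simp))

theorem pvToList_joinNl (xs : List String) :
    (PySem.Str.join "\n" xs).toList = pvJ1 xs := by
  rw [PySem.Str.toList_join, pvJ1]
  rfl

theorem pvMain (xs : List String) :
    (pvAuxA xs false = [] ∧ pvCollect xs = []) ∨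
    (pvCollect xs ≠ [] ∧ ∃ t : Bool,
      pvJ1 (pvAuxA xs false) = pvJ2 (pvCollect xs) ++ (if t then ['\n'] else [])) := by
  induction xs using pvCollect.induct with
  | case1 => exact Or.inl ⟨rfl, pvCollect_nil⟩
  | case2 l rest hs p ih =>
    have hs' : pvIsStart l = true := by simpa [pvIsStart] using hs
    have hq : p = pvTakeBlock (l :: rest) := rfl
    rw [hq, pvTakeBlock_cons_noend l rest (pvStart_not_end l hs')] at ih
    dsimp only at ih
    right
    rw [pvCollect_cons_start l rest hs', pvAuxA_false_start l rest hs']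
    refine ⟨by simp, ?_⟩
    rw [pvAuxA_true rest]
    cases hA : rest.any pvIsEnd with
    | false =>
      rw [pvTakeBlock_no_end rest hA]
      refine ⟨false, ?_⟩
      rw [pvCollect_nil]
      simp [pvJ1, pvJ2]
    | true =>
      simp only [if_true]
      rcases ih with ⟨hws, hcr⟩ | ⟨hne, t, hEq⟩
      · refine ⟨true, ?_⟩
        rw [hws, hcr]
        simp only [pvJ1, pvJ2, List.map_cons, List.map_nil]
        rw [show (l.toList :: List.map String.toList ((pvTakeBlock rest).1 ++ [""]))
            = (l.toList :: List.map String.toList (pvTakeBlock rest).1) ++ [[]] by simp]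
        rw [pvJoin_append ['\n'] _ [[]] (by simp) (by simp), PySem.Chars.join_singleton,
          PySem.Chars.join_singleton, pvToList_joinNl]
        simp [pvJ1]
      · have hws : pvAuxA (pvTakeBlock rest).2 false ≠ [] := by
          intro h0
          rw [h0] at hEq
          have hz : pvJ2 (pvCollect (pvTakeBlock rest).2) ++ (if t then ['\n'] else []) = [] := by
            rw [← hEq]; simp [pvJ1, PySem.Chars.join_nil]
          rcases List.append_eq_nil_iff.mp hz with ⟨h1, _⟩
          exact pvJ2_ne_nil _ hne (pvCollect_ne_nil _) h1
        refine ⟨t, ?_⟩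
        rw [show l :: ((pvTakeBlock rest).1 ++ "" :: pvAuxA (pvTakeBlock rest).2 false)
            = (l :: (pvTakeBlock rest).1) ++ "" :: pvAuxA (pvTakeBlock rest).2 false by simp]
        rw [pvJ1, List.map_append,
          pvJoin_append ['\n'] _ _ (by simp) (by simp)]
        simp only [List.map_cons]
        rw [pvJoin_cons_ne ['\n'] (String.toList "")
            (List.map String.toList (pvAuxA (pvTakeBlock rest).2 false)) (by simpa using hws)]
        rw [show PySem.Chars.join ['\n'] (List.map String.toList (pvAuxA (pvTakeBlock rest).2 false))
            = pvJ1 (pvAuxA (pvTakeBlock rest).2 false) from rfl, hEq]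
        rw [show pvJ2 (PySem.Str.join "\n" (l :: (pvTakeBlock rest).1) :: pvCollect (pvTakeBlock rest).2)
            = (PySem.Str.join "\n" (l :: (pvTakeBlock rest).1)).toList ++ ['\n', '\n'] ++
              pvJ2 (pvCollect (pvTakeBlock rest).2) by
          simp only [pvJ2, List.map_cons]
          exact pvJoin_cons_ne _ _ _ (by simpa using hne)]
        rw [pvToList_joinNl]
        simp [pvJ1, List.append_assoc, show ("" : String).toList = [] from rfl]
  | case3 l rest hs ih =>
    have hs' : pvIsStart l = false := by simp [pvIsStart]; simpa using hs
    rw [pvCollect_cons_nostart l rest hs', pvAuxA_false_nostart l rest hs']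
    exact ih

theorem pvRstrip_opt_nl (x : List Char) (t : Bool) :
    PySem.Chars.rstrip (x ++ (if t then ['\n'] else [])) = PySem.Chars.rstrip x := by
  cases t
  · simp
  · simp [PySem.Chars.rstrip, show PySem.Chars.isspace '\n' = true from rfl]

-- ===== VERDICT (by name: the statement is the Claim_ definition above) =====
theorem extract_resource_stanzas_spec : Claim_equal_extract_resource_stanzas := by
  intro p _
  unfold Spec_extract_resource_stanzas extract_resource_stanzas extract_resource_stanzas_alt
  dsimp only
  rw [show (fun (acc : List String × Bool) line =>
      let inside := if PySem.Str.startswith (PySem.Str.strip line) "resource \"" then true else acc.2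
      if inside then
        if PySem.Str.strip line == "end" then (acc.1 ++ [line, ""], false)
        else (acc.1 ++ [line], true)
      else (acc.1, inside)) = pvStep from rfl]
  rw [pvFoldA]
  apply String.toList_inj.mp
  rw [PySem.Str.toList_rstrip, PySem.Str.toList_rstrip, PySem.Str.toList_join, PySem.Str.toList_join,
    List.nil_append]
  rcases pvMain (PySem.Str.splitlines p) with ⟨h1, h2⟩ | ⟨_, t, hEq⟩
  · rw [h1, h2]
    simp [PySem.Chars.join_nil]
  · have hX : PySem.Chars.join ("\n".toList) ((pvAuxA (PySem.Str.splitlines p) false).map String.toList)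
        = pvJ1 (pvAuxA (PySem.Str.splitlines p) false) := rfl
    have hY : PySem.Chars.join ("\n\n".toList) ((pvCollect (PySem.Str.splitlines p)).map String.toList)
        = pvJ2 (pvCollect (PySem.Str.splitlines p)) := rfl
    rw [hX, hY, hEq, pvRstrip_opt_nl]
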